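-- pv_equiv track=rewrite | github.com/CDBiddulph/scaffold-learning | scaffolds/human/crossword_early/scaffold.py | get_crossing_info
-- ===== SOURCE A (Python) =====
-- def get_crossing_info(slot, grid, numbering_grid, all_slots_dict):
--     """Get information about words that cross this slot."""
--     _, row, col, length, _, direction = slot
--     crossing_info = []
--
--     for i in range(length):
--         if direction == "across":
--             r, c = row, col + i
--             # Check for down word at this position
--             for num, slots in all_slots_dict.items():
--                 for s in slots:
--                     if s[5] == "down" and s[1] <= r < s[1] + s[3] and s[2] == c:
--                         crossing_info.append((r, c, s))
--                         break
--         else:  # down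
--             r, c = row + i, col
--             # Check for across word at this position
--             for num, slots in all_slots_dict.items():
--                 for s in slots:
--                     if s[5] == "across" and s[1] == r and s[2] <= c < s[2] + s[3]:
--                         crossing_info.append((r, c, s))
--                         break
--
--     return crossing_info
-- ===== SOURCE B (Python) =====
-- def get_crossing_info(slot, grid, numbering_grid, all_slots_dict):
--     """Get information about words that cross this slot."""
--     _, row, col, length, _, direction = slot
--     across = direction == "across"
--     # One pass over all slots: bucket, per cell of THIS slot, the perpendicular
--     # slots that cross it there (first match per numbering entry, in num order).
--     crossmap = {}
--     for num, slots in all_slots_dict.items():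
--         first = {}
--         for s in slots:
--             if across:
--                 if s[5] == "down" and s[1] <= row < s[1] + s[3] and col <= s[2] < col + length:
--                     first.setdefault((row, s[2]), s)
--             else:
--                 if s[5] == "across" and s[2] <= col < s[2] + s[3] and row <= s[1] < row + length:
--                     first.setdefault((s[1], col), s)
--         for cell, s in first.items():
--             crossmap.setdefault(cell, []).append(s)
--     if across:
--         cells = [(row, col + i) for i in range(length)]
--     else:
--         cells = [(row + i, col) for i in range(length)]
--     return [(r, c, s) for (r, c) in cells for s in crossmap.get((r, c), [])]
-- ===== Notes on version B (the rewrite author's own statement) =====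
-- stated objective: faster
-- what changed: A rescans every numbered entry's slot list at each of the slot's cells; B makes one pass over all slot lists, bucketing for each crossing cell the first perpendicular slot per entry (in entry order) into a dict keyed by cell, then emits each cell's bucket by direct lookup.
import Mathlib
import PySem

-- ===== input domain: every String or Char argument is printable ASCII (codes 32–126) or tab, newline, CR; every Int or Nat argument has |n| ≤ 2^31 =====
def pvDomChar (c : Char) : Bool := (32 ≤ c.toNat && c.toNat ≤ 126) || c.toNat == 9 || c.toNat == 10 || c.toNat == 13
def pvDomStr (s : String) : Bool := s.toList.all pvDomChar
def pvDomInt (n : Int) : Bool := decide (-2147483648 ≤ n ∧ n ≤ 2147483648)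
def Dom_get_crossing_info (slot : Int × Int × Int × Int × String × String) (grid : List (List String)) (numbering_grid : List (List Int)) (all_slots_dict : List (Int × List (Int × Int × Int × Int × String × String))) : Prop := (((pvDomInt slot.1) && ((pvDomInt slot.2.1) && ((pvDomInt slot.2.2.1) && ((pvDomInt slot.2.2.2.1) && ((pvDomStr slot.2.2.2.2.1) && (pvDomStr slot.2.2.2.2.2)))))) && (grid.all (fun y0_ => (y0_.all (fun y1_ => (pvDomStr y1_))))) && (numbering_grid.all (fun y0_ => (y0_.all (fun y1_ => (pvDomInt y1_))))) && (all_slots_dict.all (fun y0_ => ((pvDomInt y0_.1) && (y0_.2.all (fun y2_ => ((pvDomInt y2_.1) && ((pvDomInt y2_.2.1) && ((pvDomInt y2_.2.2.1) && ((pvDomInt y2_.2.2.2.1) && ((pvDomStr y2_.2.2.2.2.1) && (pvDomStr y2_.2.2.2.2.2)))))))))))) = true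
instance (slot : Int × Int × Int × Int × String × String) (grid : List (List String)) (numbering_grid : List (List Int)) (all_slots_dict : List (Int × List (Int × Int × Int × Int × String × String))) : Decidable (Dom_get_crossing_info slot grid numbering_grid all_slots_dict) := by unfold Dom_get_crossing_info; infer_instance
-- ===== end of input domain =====

-- B replaces A's per-cell scan of every slot (O(length · total_slots)) by one pass over the
-- slot lists that buckets the perpendicular crossings per cell, then a direct lookup per cell.

-- ===== PORT A =====
-- A's inner 'for s in slots: if …: append; break' takes the FIRST matching s of each entry:
-- ported as List.find? on the entry's slot list (exact: find? is first-match-or-none).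
def get_crossing_info (slot : Int × Int × Int × Int × String × String) (grid : List (List String)) (numbering_grid : List (List Int)) (all_slots_dict : List (Int × List (Int × Int × Int × Int × String × String))) : List (Int × Int × (Int × Int × Int × Int × String × String)) :=
  match slot with
  | (_, row, col, length, _, direction) =>
    (PySem.List.pyRange 0 length 1).foldl (fun acc i =>
      if direction == "across" then
        all_slots_dict.foldl (fun acc e =>
          match e.2.find? (fun s =>
              s.2.2.2.2.2 == "down" && decide (s.2.1 ≤ row) && decide (row < s.2.1 + s.2.2.2.1)
                && s.2.2.1 == col + i) with
          | some s => acc ++ [(row, col + i, s)]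
          | none => acc) acc
      else
        all_slots_dict.foldl (fun acc e =>
          match e.2.find? (fun s =>
              s.2.2.2.2.2 == "across" && s.2.1 == row + i && decide (s.2.2.1 ≤ col)
                && decide (col < s.2.2.1 + s.2.2.2.1)) with
          | some s => acc ++ [(row + i, col, s)]
          | none => acc) acc) []

-- ===== PORT B =====
def get_crossing_info_alt (slot : Int × Int × Int × Int × String × String) (grid : List (List String)) (numbering_grid : List (List Int)) (all_slots_dict : List (Int × List (Int × Int × Int × Int × String × String))) : List (Int × Int × (Int × Int × Int × Int × String × String)) :=
  match slot with
  | (_, row, col, length, _, direction) =>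
    let across := direction == "across"
    let crossmap := all_slots_dict.foldl (fun cm e =>
      let first := e.2.foldl (fun f s =>
        if across then
          if s.2.2.2.2.2 == "down" && decide (s.2.1 ≤ row) && decide (row < s.2.1 + s.2.2.2.1)
              && decide (col ≤ s.2.2.1) && decide (s.2.2.1 < col + length) then
            f.setdefault (row, s.2.2.1) s
          else f
        else
          if s.2.2.2.2.2 == "across" && decide (s.2.2.1 ≤ col) && decide (col < s.2.2.1 + s.2.2.2.1)
              && decide (row ≤ s.2.1) && decide (s.2.1 < row + length) then
            f.setdefault (s.2.1, col) s
          else f)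
        (PySem.Dict.empty : PySem.Dict (Int × Int) (Int × Int × Int × Int × String × String))
      -- crossmap.setdefault(cell, []).append(s)  ==  crossmap[cell] = crossmap.get(cell, []) + [s]
      first.items.foldl (fun cm p => cm.modify p.1 [] (· ++ [p.2])) cm)
      (PySem.Dict.empty : PySem.Dict (Int × Int) (List (Int × Int × Int × Int × String × String)))
    let cells := if across then (PySem.List.pyRange 0 length 1).map (fun i => (row, col + i))
                 else (PySem.List.pyRange 0 length 1).map (fun i => (row + i, col))
    cells.foldl (fun acc rc => acc ++ (crossmap.getD rc []).map (fun s => (rc.1, rc.2, s))) []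

-- ===== PRECONDITION & SPEC =====
def Spec_get_crossing_info (slot : Int × Int × Int × Int × String × String) (grid : List (List String)) (numbering_grid : List (List Int)) (all_slots_dict : List (Int × List (Int × Int × Int × Int × String × String))) (out : List (Int × Int × (Int × Int × Int × Int × String × String))) : Prop := out = get_crossing_info_alt slot grid numbering_grid all_slots_dict
instance (slot : Int × Int × Int × Int × String × String) (grid : List (List String)) (numbering_grid : List (List Int)) (all_slots_dict : List (Int × List (Int × Int × Int × Int × String × String))) (out : List (Int × Int × (Int × Int × Int × Int × String × String))) : Decidable (Spec_get_crossing_info slot grid numbering_grid all_slots_dict out) := by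
  unfold Spec_get_crossing_info
  haveI h6 : DecidableEq (Int × Int × Int × Int × String × String) := inferInstance
  exact @instDecidableEqList _
    (@instDecidableEqProd _ _ inferInstance (@instDecidableEqProd _ _ inferInstance h6)) _ _

-- ===== CLAIM (what is proved, stated in full; the proofs are below) =====
def Claim_equal_get_crossing_info : Prop := ∀ (slot : Int × Int × Int × Int × String × String) (grid : List (List String)) (numbering_grid : List (List Int)) (all_slots_dict : List (Int × List (Int × Int × Int × Int × String × String))), Dom_get_crossing_info slot grid numbering_grid all_slots_dict → Spec_get_crossing_info slot grid numbering_grid all_slots_dict (get_crossing_info slot grid numbering_grid all_slots_dict)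

-- ===== LEMMAS AND PROOFS =====

theorem setdefault_eq {κ ν : Type} [BEq κ] (d : PySem.Dict κ ν) (k : κ) (v : ν) :
    d.setdefault k v = if d.contains k then d else d.insert k v := by
  simp only [PySem.Dict.setdefault, PySem.Dict.insert]
  split <;> simp_all

theorem firstFold_get? (cond : (Int × Int × Int × Int × String × String) → Bool)
    (key : (Int × Int × Int × Int × String × String) → Int × Int)
    (slots : List (Int × Int × Int × Int × String × String))
    (f0 : PySem.Dict (Int × Int) (Int × Int × Int × Int × String × String)) (c : Int × Int) :
    (slots.foldl (fun f s => if cond s then f.setdefault (key s) s else f) f0).get? c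
      = (f0.get? c).or (slots.find? (fun s => cond s && (key s == c))) := by
  induction slots generalizing f0 with
  | nil => simp
  | cons s rest ih =>
    simp only [List.foldl_cons, List.find?_cons]
    by_cases hc : cond s = true
    · rw [if_pos hc, setdefault_eq]
      by_cases hk : key s = c
      · subst hk
        by_cases hcont : f0.contains (key s) = true
        · obtain ⟨v, hv⟩ : ∃ v, f0.get? (key s) = some v := by
            rw [PySem.Dict.contains_eq_isSome_get?] at hcont
            exact Option.isSome_iff_exists.mp hcont
          simp [hc, hcont, ih, hv]
        · have hnone : f0.get? (key s) = none := by
            rw [PySem.Dict.contains_eq_isSome_get?] at hcont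
            simpa using hcont
          simp [hc, hcont, ih, hnone, PySem.Dict.get?_insert_self]
      · have : (key s == c) = false := by simp [hk]
        by_cases hcont : f0.contains (key s) = true
        · simp [hc, hcont, ih, this]
        · simp [hc, hcont, ih, this, PySem.Dict.get?_insert_of_ne _ _ (Ne.symm hk)]
    · have hcf : cond s = false := by simpa using hc
      simp [hcf, ih]

theorem firstFold_nodup (cond : (Int × Int × Int × Int × String × String) → Bool)
    (key : (Int × Int × Int × Int × String × String) → Int × Int)
    (slots : List (Int × Int × Int × Int × String × String))
    (f0 : PySem.Dict (Int × Int) (Int × Int × Int × Int × String × String))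
    (h : f0.keys.Nodup) :
    (slots.foldl (fun f s => if cond s then f.setdefault (key s) s else f) f0).keys.Nodup := by
  induction slots generalizing f0 with
  | nil => simpa using h
  | cons s rest ih =>
    simp only [List.foldl_cons]
    apply ih
    rw [setdefault_eq]
    split
    · split
      · exact h
      · exact PySem.Dict.nodup_keys_insert _ _ _ h
    · exact h

theorem items_filter_key {κ ν : Type} [BEq κ] [LawfulBEq κ] (d : PySem.Dict κ ν) (c : κ)
    (h : d.keys.Nodup) :
    (d.items.filter (fun p => p.1 == c)).map (·.2) = (d.get? c).toList := by
  obtain ⟨l⟩ := d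
  induction l with
  | nil => simp [PySem.Dict.get?]
  | cons p rest ih =>
    simp only [PySem.Dict.keys] at h ih ⊢
    simp only [List.map_cons, List.nodup_cons] at h
    rw [PySem.Dict.get?_mk_cons]
    by_cases hp : p.1 = c
    · subst hp
      -- no other item has key p.1
      have : (rest.filter (fun q => q.1 == p.1)).map (·.2) = [] := by
        rw [List.map_eq_nil_iff, List.filter_eq_nil_iff]
        intro q hq
        simp only [beq_iff_eq]
        intro hqe
        exact h.1 (hqe ▸ List.mem_map_of_mem hq)
      simp [this]
    · have : (p.1 == c) = false := by simp [hp]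
      simp only [List.filter_cons, this]
      simp only [Bool.false_eq_true, if_false]
      exact ih h.2

theorem crossFold_getD (cond : (Int × Int × Int × Int × String × String) → Bool)
    (key : (Int × Int × Int × Int × String × String) → Int × Int)
    (L : List (Int × List (Int × Int × Int × Int × String × String)))
    (cm : PySem.Dict (Int × Int) (List (Int × Int × Int × Int × String × String))) (c : Int × Int) :
    (L.foldl (fun cm e =>
        ((e.2.foldl (fun f s => if cond s then f.setdefault (key s) s else f)
            (PySem.Dict.empty : PySem.Dict (Int × Int) (Int × Int × Int × Int × String × String))).items).foldl
          (fun cm p => cm.modify p.1 [] (· ++ [p.2])) cm) cm).getD c []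
      = cm.getD c [] ++ L.flatMap (fun e => (e.2.find? (fun s => cond s && (key s == c))).toList) := by
  induction L generalizing cm with
  | nil => simp
  | cons e rest ih =>
    simp only [List.foldl_cons, List.flatMap_cons]
    rw [ih, PySem.Dict.getD_foldl_modify_append,
        items_filter_key _ c (firstFold_nodup cond key e.2 _ (by simp [PySem.Dict.keys_empty])),
        firstFold_get?]
    simp [List.append_assoc]

theorem foldA (p : (Int × Int × Int × Int × String × String) → Bool)
    (emit : (Int × Int × Int × Int × String × String) → Int × Int × (Int × Int × Int × Int × String × String))
    (L : List (Int × List (Int × Int × Int × Int × String × String)))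
    (acc : List (Int × Int × (Int × Int × Int × Int × String × String))) :
    L.foldl (fun acc e =>
        match e.2.find? p with
        | some s => acc ++ [emit s]
        | none => acc) acc
      = acc ++ (L.flatMap (fun e => (e.2.find? p).toList)).map emit := by
  induction L generalizing acc with
  | nil => simp
  | cons e rest ih =>
    simp only [List.foldl_cons, List.flatMap_cons]
    cases hf : e.2.find? p with
    | none => simp [ih]
    | some s => simp [ih]

-- A = B, both unfolded; used by the verdict below.
theorem get_crossing_info_eq_alt : ∀ (slot : Int × Int × Int × Int × String × String) (grid : List (List String)) (numbering_grid : List (List Int)) (all_slots_dict : List (Int × List (Int × Int × Int × Int × String × String))),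
    get_crossing_info slot grid numbering_grid all_slots_dict = get_crossing_info_alt slot grid numbering_grid all_slots_dict := by
  intro slot grid numbering_grid L
  obtain ⟨a, row, col, len, w, dir⟩ := slot
  unfold get_crossing_info get_crossing_info_alt
  cases hd : (dir == "across") with
  | true =>
    simp only [hd, if_true, List.foldl_map]
    apply PySem.List.foldl_congr_mem
    intro acc i hi
    obtain ⟨hi0, hil⟩ := PySem.List.mem_pyRange_one.mp hi
    rw [foldA _ (fun s => (row, col + i, s)),
        crossFold_getD (fun s => s.2.2.2.2.2 == "down" && decide (s.2.1 ≤ row) && decide (row < s.2.1 + s.2.2.2.1) && decide (col ≤ s.2.2.1) && decide (s.2.2.1 < col + len)) (fun s => (row, s.2.2.1)) L PySem.Dict.empty (row, col + i)]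
    simp only [PySem.Dict.getD_empty, List.nil_append]
    have hp : (fun (s : Int × Int × Int × Int × String × String) =>
          s.2.2.2.2.2 == "down" && decide (s.2.1 ≤ row) && decide (row < s.2.1 + s.2.2.2.1)
            && (s.2.2.1 == col + i))
        = (fun (s : Int × Int × Int × Int × String × String) =>
          s.2.2.2.2.2 == "down" && decide (s.2.1 ≤ row) && decide (row < s.2.1 + s.2.2.2.1)
            && decide (col ≤ s.2.2.1) && decide (s.2.2.1 < col + len)
            && ((row, s.2.2.1) == (row, col + i))) := by
      funext s
      rw [Bool.eq_iff_iff]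
      by_cases hs : s.2.2.2.2.2 = "down" <;> simp [hs]
      omega
    rw [hp]

  | false =>
    simp only [hd, if_false, Bool.false_eq_true, List.foldl_map]
    apply PySem.List.foldl_congr_mem
    intro acc i hi
    obtain ⟨hi0, hil⟩ := PySem.List.mem_pyRange_one.mp hi
    rw [foldA _ (fun s => (row + i, col, s)),
        crossFold_getD (fun s => s.2.2.2.2.2 == "across" && decide (s.2.2.1 ≤ col) && decide (col < s.2.2.1 + s.2.2.2.1) && decide (row ≤ s.2.1) && decide (s.2.1 < row + len)) (fun s => (s.2.1, col)) L PySem.Dict.empty (row + i, col)]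
    simp only [PySem.Dict.getD_empty, List.nil_append]
    have hp : (fun (s : Int × Int × Int × Int × String × String) =>
          s.2.2.2.2.2 == "across" && (s.2.1 == row + i) && decide (s.2.2.1 ≤ col)
            && decide (col < s.2.2.1 + s.2.2.2.1))
        = (fun (s : Int × Int × Int × Int × String × String) =>
          s.2.2.2.2.2 == "across" && decide (s.2.2.1 ≤ col) && decide (col < s.2.2.1 + s.2.2.2.1)
            && decide (row ≤ s.2.1) && decide (s.2.1 < row + len)
            && ((s.2.1, col) == (row + i, col))) := by
      funext s
      rw [Bool.eq_iff_iff]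
      by_cases hs : s.2.2.2.2.2 = "across" <;> simp [hs]
      omega
    rw [hp]

-- ===== VERDICT (by name: the statement is the Claim_ definition above) =====
theorem get_crossing_info_spec : Claim_equal_get_crossing_info := by
  intro slot grid numbering_grid all_slots_dict _
  unfold Spec_get_crossing_info
  exact get_crossing_info_eq_alt slot grid numbering_grid all_slots_dict
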